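-- pv_equiv track=rewrite | github.com/clivingston33/Media-Forge | backend/app/services/runner_service.py | last_error_message
-- ===== SOURCE A (Python) =====
-- def last_error_message(stderr_lines: list[str], stdout_lines: list[str]) -> str:
--     for line in reversed(stderr_lines):
--         if line.strip():
--             return line.strip()
--
--     for line in reversed(stdout_lines):
--         if line.strip():
--             return line.strip()
--
--     return "The media process failed without a detailed error message."
-- ===== SOURCE B (Python) =====
-- def last_error_message(stderr_lines: list[str], stdout_lines: list[str]) -> str:
--     last = None
--     for line in stderr_lines:
--         s = line.strip()
--         if s:
--             last = s
--     if last is not None: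
--         return last
--     for line in stdout_lines:
--         s = line.strip()
--         if s:
--             last = s
--     if last is not None:
--         return last
--     return "The media process failed without a detailed error message."
-- ===== Notes on version B (the rewrite author's own statement) =====
-- stated objective: alternative
-- what changed: Replaces two reverse scans with early return by two forward folds that keep overwriting an Optional accumulator with the latest non-empty stripped line, returning it after each list if set.
import Mathlib
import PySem

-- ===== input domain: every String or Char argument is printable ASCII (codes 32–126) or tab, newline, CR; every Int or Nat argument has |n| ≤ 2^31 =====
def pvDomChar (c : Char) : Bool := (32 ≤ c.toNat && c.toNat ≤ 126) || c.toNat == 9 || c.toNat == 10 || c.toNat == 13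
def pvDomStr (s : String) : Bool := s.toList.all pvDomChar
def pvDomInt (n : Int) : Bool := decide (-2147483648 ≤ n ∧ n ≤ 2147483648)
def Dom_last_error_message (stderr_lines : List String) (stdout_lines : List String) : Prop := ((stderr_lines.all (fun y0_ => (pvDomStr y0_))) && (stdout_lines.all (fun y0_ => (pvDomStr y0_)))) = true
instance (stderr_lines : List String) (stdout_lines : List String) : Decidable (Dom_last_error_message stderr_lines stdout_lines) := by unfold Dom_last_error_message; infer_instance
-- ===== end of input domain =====

-- B replaces A's two reverse scans with early exit by forward folds keeping the last non-empty stripped line in an Option accumulator (objective: alternative).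

-- ===== PORT A =====
-- A's reverse loop with early return: first non-empty stripped line of the reversed list.
def pvFindStripped : List String → Option String
  | [] => none
  | l :: rest =>
      if PySem.Str.strip l ≠ "" then some (PySem.Str.strip l) else pvFindStripped rest

def last_error_message (stderr_lines : List String) (stdout_lines : List String) : String :=
  match pvFindStripped stderr_lines.reverse with
  | some s => s
  | none =>
    match pvFindStripped stdout_lines.reverse with
    | some s => s
    | none => "The media process failed without a detailed error message."

-- ===== PORT B =====
-- B's forward loop body: overwrite the accumulator whenever the stripped line is non-empty.
def pvKeepLast (acc : Option String) (line : String) : Option String :=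
  let s := PySem.Str.strip line
  if s ≠ "" then some s else acc

def last_error_message_alt (stderr_lines : List String) (stdout_lines : List String) : String :=
  match stderr_lines.foldl pvKeepLast none with
  | some s => s
  | none =>
    match stdout_lines.foldl pvKeepLast none with
    | some s => s
    | none => "The media process failed without a detailed error message."

-- ===== PRECONDITION & SPEC =====
def Spec_last_error_message (stderr_lines : List String) (stdout_lines : List String) (out : String) : Prop := out = last_error_message_alt stderr_lines stdout_lines
instance (stderr_lines : List String) (stdout_lines : List String) (out : String) : Decidable (Spec_last_error_message stderr_lines stdout_lines out) := by unfold Spec_last_error_message; infer_instance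

-- ===== CLAIM (what is proved, stated in full; the proofs are below) =====
def Claim_equal_last_error_message : Prop := ∀ (stderr_lines : List String) (stdout_lines : List String), Dom_last_error_message stderr_lines stdout_lines → Spec_last_error_message stderr_lines stdout_lines (last_error_message stderr_lines stdout_lines)

-- ===== LEMMAS AND PROOFS =====

theorem pvFindStripped_append (ys zs : List String) :
    pvFindStripped (ys ++ zs) =
      match pvFindStripped ys with
      | some s => some s
      | none => pvFindStripped zs := by
  induction ys with
  | nil => simp [pvFindStripped]
  | cons l rest ih =>
      simp only [List.cons_append, pvFindStripped]
      split_ifs <;> simp [ih]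

theorem foldl_pvKeepLast (xs : List String) (a : Option String) :
    xs.foldl pvKeepLast a =
      match pvFindStripped xs.reverse with
      | some s => some s
      | none => a := by
  induction xs generalizing a with
  | nil => simp [pvFindStripped]
  | cons l rest ih =>
      simp only [List.foldl_cons, List.reverse_cons, ih, pvFindStripped_append]
      cases h : pvFindStripped rest.reverse with
      | some s => simp
      | none =>
          simp only [pvFindStripped, pvKeepLast]
          split_ifs <;> simp

-- ===== VERDICT (by name: the statement is the Claim_ definition above) =====
theorem last_error_message_spec : Claim_equal_last_error_message := by
  intro stderr_lines stdout_lines _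
  unfold Spec_last_error_message last_error_message last_error_message_alt
  rw [foldl_pvKeepLast, foldl_pvKeepLast]
  cases pvFindStripped stderr_lines.reverse <;>
    cases pvFindStripped stdout_lines.reverse <;> rfl
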